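-- pv_equiv track=rewrite | github.com/zlj09/DirectedGM | DirectGM.py | shiftByMask
-- ===== SOURCE A (Python) =====
-- def shiftByMask(num, mask):
--     p_m = 0
--     res = 0
--     while (mask):
--         b_m = mask & 1
--         b_n = num &  1
--         if (b_m):
--             res |= b_n << p_m
--             num >>= 1
--         mask >>= 1
--         p_m += 1
--     return(res)
-- ===== SOURCE B (Python) =====
-- def shiftByMask(num, mask):
--     # Recursive back-to-front deposit: bit 0 of the result comes from mask's bit 0
--     # (consuming a num bit when it is set), the rest from the recursion, shifted up.
--     if mask == 0:
--         return 0
--     if mask & 1: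
--         return (num & 1) | (shiftByMask(num >> 1, mask >> 1) << 1)
--     return shiftByMask(num, mask >> 1) << 1
-- ===== Notes on version B (the rewrite author's own statement) =====
-- stated objective: alternative
-- what changed: Replaces the iterative while-loop with a result accumulator and explicit bit-position counter p_m by a direct recursion on mask that builds the result back-to-front out of shifts, with no counter and no accumulator.
import Mathlib
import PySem

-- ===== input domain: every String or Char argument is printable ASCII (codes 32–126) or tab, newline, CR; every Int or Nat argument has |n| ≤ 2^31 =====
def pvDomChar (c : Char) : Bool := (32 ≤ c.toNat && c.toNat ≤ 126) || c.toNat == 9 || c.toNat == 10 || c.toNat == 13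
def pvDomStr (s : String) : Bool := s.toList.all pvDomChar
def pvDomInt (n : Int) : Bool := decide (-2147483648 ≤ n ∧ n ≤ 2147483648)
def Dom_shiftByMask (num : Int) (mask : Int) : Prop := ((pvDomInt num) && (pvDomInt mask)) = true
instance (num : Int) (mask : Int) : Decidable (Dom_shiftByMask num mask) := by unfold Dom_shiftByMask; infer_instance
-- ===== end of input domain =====

-- B replaces A's while-loop (accumulator res, position counter p_m) by a direct recursion on
-- mask that assembles the result back-to-front with shifts; same values, same cost (objective: alternative).


-- termination helper, cited by both ports
theorem pvShiftrToNatLt (mask : Int) (h : 0 < mask) : (mask >>> (1:Nat)).toNat < mask.toNat := by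
  obtain ⟨m, rfl⟩ := Int.eq_ofNat_of_zero_le h.le
  have hc : ((m : Int) >>> (1:Nat)) = ((m >>> 1 : Nat) : Int) := rfl
  rw [hc, Int.toNat_natCast, Int.toNat_natCast, Nat.shiftRight_eq_div_pow]
  have hm : 0 < m := by exact_mod_cast h
  omega

-- ===== PORT A =====
-- A's while-loop; the guard `mask ≤ 0` (Python: `while mask`) only makes the recursion total:
-- on mask < 0 the Python loop never terminates (and both ports then return their accumulator).
def shiftByMaskLoop (num : Int) (mask : Int) (res : Int) (p_m : Nat) : Int :=
  if h : mask ≤ 0 then res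
  else
    let b_m := PySem.Int.band mask 1
    let b_n := PySem.Int.band num 1
    if b_m ≠ 0 then
      shiftByMaskLoop (num >>> (1:Nat)) (mask >>> (1:Nat)) (PySem.Int.bor res (b_n <<< p_m)) (p_m + 1)
    else
      shiftByMaskLoop num (mask >>> (1:Nat)) res (p_m + 1)
  termination_by mask.toNat
  decreasing_by all_goals exact pvShiftrToNatLt mask (by omega)

def shiftByMask (num : Int) (mask : Int) : Int :=
  shiftByMaskLoop num mask 0 0

-- ===== PORT B =====
-- B's recursion; same totality guard (`mask ≤ 0` instead of `mask == 0`): B's Python also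
-- fails to terminate on mask < 0, where both ports return 0.
def shiftByMask_alt (num : Int) (mask : Int) : Int :=
  if _h : mask ≤ 0 then 0
  else if PySem.Int.band mask 1 ≠ 0 then
    PySem.Int.bor (PySem.Int.band num 1) (shiftByMask_alt (num >>> (1:Nat)) (mask >>> (1:Nat)) <<< (1:Nat))
  else
    shiftByMask_alt num (mask >>> (1:Nat)) <<< (1:Nat)
  termination_by mask.toNat
  decreasing_by all_goals exact pvShiftrToNatLt mask (by omega)

-- ===== PRECONDITION & SPEC =====
def Spec_shiftByMask (num : Int) (mask : Int) (out : Int) : Prop := out = shiftByMask_alt num mask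
instance (num : Int) (mask : Int) (out : Int) : Decidable (Spec_shiftByMask num mask out) := by
  unfold Spec_shiftByMask; infer_instance

-- ===== CLAIM (what is proved, stated in full; the proofs are below) =====
def Claim_equal_shiftByMask : Prop := ∀ (num : Int) (mask : Int), Dom_shiftByMask num mask → Spec_shiftByMask num mask (shiftByMask num mask)

-- ===== LEMMAS AND PROOFS =====

-- disjoint bitwise-or is addition (Nat)
theorem pvLorEqAdd (a b : ℕ) (h : a &&& b = 0) : a ||| b = a + b := by
  induction a using Nat.binaryRec generalizing b with
  | zero => simp
  | bit c n ih =>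
    induction b using Nat.binaryRec with
    | zero => simp
    | bit d m _ =>
      rw [Nat.land_bit] at h
      rw [Nat.lor_bit]
      rw [Nat.bit_val] at h
      have h2 : n &&& m = 0 := by omega
      rw [ih m h2, Nat.bit_val, Nat.bit_val, Nat.bit_val]
      rcases c <;> rcases d <;> simp_all <;> omega

theorem pvLandTwoPow (r p : ℕ) (h : r < 2 ^ p) : r &&& 2 ^ p = 0 := by
  apply Nat.eq_of_testBit_eq
  intro j
  rw [Nat.testBit_and, Nat.zero_testBit, Nat.testBit_two_pow]
  by_cases hj : j = p
  · subst hj; rw [Nat.testBit_lt_two_pow h]; simp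
  · simp [Ne.symm hj]

theorem pvBandOneCases (a : Int) : PySem.Int.band a 1 = 0 ∨ PySem.Int.band a 1 = 1 := by
  rw [PySem.Int.band_one]
  have hm : PySem.Int.mod a 2 = a % 2 := Int.fmod_eq_emod_of_nonneg a (by norm_num)
  rw [hm]
  omega

-- res | (b <<< p) = res + b * 2^p for a bit b and 0 ≤ res < 2^p
theorem pvOrBitHigh (res b : Int) (p : Nat) (hr0 : 0 ≤ res) (hr : res < 2 ^ p)
    (hb : b = 0 ∨ b = 1) : PySem.Int.bor res (b <<< p) = res + b * 2 ^ p := by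
  have h2 : (0 : Int) ≤ 2 ^ p := by positivity
  rcases hb with rfl | rfl
  · rw [Int.shiftLeft_eq, zero_mul, PySem.Int.bor_of_nonneg hr0 le_rfl]
    simp [Int.toNat_of_nonneg hr0]
  · rw [Int.shiftLeft_eq, one_mul, PySem.Int.bor_of_nonneg hr0 h2]
    have ht : (2 ^ p : Int).toNat = 2 ^ p := by
      rw [← Nat.cast_ofNat (n := 2), ← Nat.cast_pow, Int.toNat_natCast]
    rw [ht, pvLorEqAdd _ _ (pvLandTwoPow _ _ (by omega))]
    push_cast
    rw [Int.toNat_of_nonneg hr0]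

-- b | (x <<< 1) = b + 2 * x for a bit b and 0 ≤ x
theorem pvOrBitLow (b x : Int) (hb : b = 0 ∨ b = 1) (hx : 0 ≤ x) :
    PySem.Int.bor b (x <<< (1:Nat)) = b + 2 * x := by
  have hs : x <<< (1:Nat) = 2 * x := by rw [Int.shiftLeft_eq]; ring
  rcases hb with rfl | rfl
  · rw [hs, PySem.Int.bor_of_nonneg le_rfl (by omega)]
    simp [Int.toNat_of_nonneg (show (0:Int) ≤ 2 * x by omega)]
  · rw [hs, PySem.Int.bor_of_nonneg (by norm_num) (by omega)]
    have h1 : (1 : Int).toNat = 1 := rfl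
    have hd : 1 &&& (2 * x).toNat = 0 := by
      rw [Nat.one_and_eq_mod_two]
      omega
    rw [h1, pvLorEqAdd 1 (2 * x).toNat hd]
    have := Int.toNat_of_nonneg (show (0:Int) ≤ 2 * x by omega)
    push_cast
    omega

theorem pvAltNonneg (num mask : Int) : 0 ≤ shiftByMask_alt num mask := by
  induction num, mask using shiftByMask_alt.induct with
  | case1 num mask h => rw [shiftByMask_alt]; simp [h]
  | case2 num mask h hb ih =>
    rw [shiftByMask_alt]
    simp only [dif_neg h, if_pos hb]
    have hbn := pvBandOneCases num
    rw [pvOrBitLow _ _ hbn ih]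
    rcases hbn with h0 | h0 <;> omega
  | case3 num mask h hb ih =>
    rw [shiftByMask_alt]
    simp only [dif_neg h, if_neg hb]
    rw [Int.shiftLeft_eq]
    omega

-- the loop invariant: A's loop from accumulator res at position p computes res + B's value * 2^p
theorem pvLoopEqAlt (num mask : Int) : ∀ (res : Int) (p : Nat), 0 ≤ res → res < 2 ^ p →
    shiftByMaskLoop num mask res p = res + shiftByMask_alt num mask * 2 ^ p := by
  induction num, mask using shiftByMask_alt.induct with
  | case1 num mask h =>
    intro res p _ _
    rw [shiftByMaskLoop, shiftByMask_alt]
    simp [h]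
  | case2 num mask h hb ih =>
    intro res p hr0 hr
    rw [shiftByMaskLoop, shiftByMask_alt]
    simp only [dif_neg h, if_pos hb]
    have hbn := pvBandOneCases num
    have hx := pvAltNonneg (num >>> (1:Nat)) (mask >>> (1:Nat))
    rw [pvOrBitHigh res _ p hr0 hr hbn]
    rw [ih _ (p + 1) (by rcases hbn with h0 | h0 <;> rw [h0] <;> simpa using hr0.trans (by omega))
        (by rcases hbn with h0 | h0 <;> rw [h0] <;> rw [pow_succ] <;> omega)]
    rw [pvOrBitLow _ _ hbn hx]
    rw [pow_succ]
    ring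
  | case3 num mask h hb ih =>
    intro res p hr0 hr
    rw [shiftByMaskLoop, shiftByMask_alt]
    simp only [dif_neg h, if_neg hb]
    rw [ih res (p + 1) hr0 (by rw [pow_succ]; omega)]
    rw [Int.shiftLeft_eq, pow_succ]
    ring

-- ===== VERDICT (by name: the statement is the Claim_ definition above) =====
theorem shiftByMask_spec : Claim_equal_shiftByMask := by
  intro num mask _
  unfold Spec_shiftByMask shiftByMask
  have := pvLoopEqAlt num mask 0 0 le_rfl (by norm_num)
  simpa using this
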